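-- pv_equiv track=rewrite | github.com/gongzhaopeng/solutions.questions.algoexpert.io | Medium/MinimumPassesOfMatrix_Medium/SolutionI_MinimumPassesOfMatrix_Medium.py | minimumPassesOfMatrix
-- ===== SOURCE A (Python) =====
-- def minimumPassesOfMatrix(matrix):
--     neg_amount, frontier = 0, []
--     for i in range(len(matrix)):
--         for j in range(len(matrix[0])):
--             if matrix[i][j] < 0:
--                 neg_amount = neg_amount + 1
--             elif matrix[i][j] > 0:
--                 frontier.append((i, j))
--     pass_num = 0
--     while frontier:
--         new_frontier = []
--         for i, j in frontier:
--             new_frontier.extend(convert_neg_neighbors(i, j, matrix))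
--         if not new_frontier:
--             break
--         pass_num, neg_amount, frontier = pass_num + 1, neg_amount - len(new_frontier), new_frontier
--     return pass_num if neg_amount == 0 else -1
--
-- def convert_neg_neighbors(i, j, matrix):
--     neighbors = []
--     if i > 0:
--         neighbors.append((i - 1, j))
--     if i < len(matrix) - 1:
--         neighbors.append((i + 1, j))
--     if j > 0:
--         neighbors.append((i, j - 1))
--     if j < len(matrix[0]) - 1:
--         neighbors.append((i, j + 1))
--     neighbors = [(i, j) for i, j in neighbors if matrix[i][j] < 0]
--     for i, j in neighbors:
--         matrix[i][j] *= -1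
--     return neighbors
-- ===== SOURCE B (Python) =====
-- def minimumPassesOfMatrix(matrix):
--     # Synchronous fixpoint relaxation: repeatedly sweep the whole matrix, flipping
--     # every negative cell that has a positive neighbor, until a sweep flips nothing.
--     # Mutates matrix in place (flips the same cells as the original).
--     rows = len(matrix)
--     cols = len(matrix[0]) if matrix else 0
--     passes = 0
--     while True:
--         flips = [(i, j)
--                  for i in range(rows)
--                  for j in range(cols)
--                  if matrix[i][j] < 0 and any(
--                      0 <= ni < rows and 0 <= nj < cols and matrix[ni][nj] > 0
--                      for ni, nj in ((i - 1, j), (i + 1, j), (i, j - 1), (i, j + 1)))]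
--         if not flips:
--             break
--         for i, j in flips:
--             matrix[i][j] *= -1
--         passes += 1
--     return passes if all(matrix[i][j] >= 0
--                          for i in range(rows) for j in range(cols)) else -1
-- ===== Notes on version B (the rewrite author's own statement) =====
-- stated objective: alternative
-- what changed: Replaces A's frontier-driven BFS (per-pass new_frontier lists fed by a mutate-while-filtering neighbor helper plus a running negative counter) by synchronous fixpoint relaxation: repeated whole-matrix sweeps that collect and flip every negative cell with a positive neighbor until a sweep flips nothing, with a final full-matrix nonnegativity check instead of a counter.
import Mathlib
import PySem

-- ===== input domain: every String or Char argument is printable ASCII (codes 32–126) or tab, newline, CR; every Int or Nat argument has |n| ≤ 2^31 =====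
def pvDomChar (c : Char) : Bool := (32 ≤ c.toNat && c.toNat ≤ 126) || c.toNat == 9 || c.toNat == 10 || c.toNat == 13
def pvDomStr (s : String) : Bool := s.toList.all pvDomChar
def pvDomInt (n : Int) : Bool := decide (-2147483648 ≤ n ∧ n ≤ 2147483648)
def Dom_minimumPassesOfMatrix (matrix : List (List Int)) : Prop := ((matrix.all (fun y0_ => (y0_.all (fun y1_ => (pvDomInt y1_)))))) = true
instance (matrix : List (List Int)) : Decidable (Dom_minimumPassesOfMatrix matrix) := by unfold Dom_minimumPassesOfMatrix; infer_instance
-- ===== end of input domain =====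

-- B replaces A's frontier-driven BFS (per-pass new_frontier lists, a mutate-while-filtering helper
-- and a running negative counter) by synchronous fixpoint relaxation: whole-matrix sweeps that flip
-- every negative cell adjacent to a positive one until a sweep flips nothing; same passes, no frontier.
-- Both Pythons mutate `matrix` in place (they flip the same cells); the theorems are about the return value.

-- Shared primitive helpers: `matrix[i][j]` read and in-place `matrix[i][j] *= -1`
-- (both ports only evaluate them at indices that are in range in the Python runs).
def pvGetCell (m : List (List Int)) (i j : Int) : Int :=
  if 0 ≤ i ∧ 0 ≤ j then (m.getD i.toNat []).getD j.toNat 0 else 0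

def pvFlipRowN : List Int → Nat → List Int
  | [], _ => []
  | v :: t, 0 => (-v) :: t
  | v :: t, n+1 => v :: pvFlipRowN t n

def pvFlipN : List (List Int) → Nat → Nat → List (List Int)
  | [], _, _ => []
  | r :: t, 0, j => pvFlipRowN r j :: t
  | r :: t, n+1, j => r :: pvFlipN t n j

def pvFlipCell (m : List (List Int)) (i j : Int) : List (List Int) :=
  if 0 ≤ i ∧ 0 ≤ j then pvFlipN m i.toNat j.toNat else m

-- number of negative entries of the matrix: the fuel measure of both loops
def pvNegRow : List Int → Nat
  | [] => 0
  | v :: t => (if v < 0 then 1 else 0) + pvNegRow t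

def pvNegCount : List (List Int) → Nat
  | [] => 0
  | r :: t => pvNegRow r + pvNegCount t

-- ===== PORT A =====
def pvNbrsA (i j rows cols : Int) : List (Int × Int) :=
  ((if 0 < i then [(i - 1, j)] else []) ++ (if i < rows - 1 then [(i + 1, j)] else [])) ++
  ((if 0 < j then [(i, j - 1)] else []) ++ (if j < cols - 1 then [(i, j + 1)] else []))

def convertNegNeighbors (i j : Int) (m : List (List Int)) : List (Int × Int) × List (List Int) :=
  let ns := (pvNbrsA i j (m.length : Int) ((m.getD 0 []).length : Int)).filter
              (fun c => pvGetCell m c.1 c.2 < 0)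
  (ns, ns.foldl (fun mm c => pvFlipCell mm c.1 c.2) m)

def passConvert (m : List (List Int)) (front : List (Int × Int)) :
    List (Int × Int) × List (List Int) :=
  front.foldl (fun st c =>
    let r := convertNegNeighbors c.1 c.2 st.2
    (st.1 ++ r.1, r.2)) ([], m)

def loopA : Nat → List (List Int) → List (Int × Int) → Int → Int → Int
  | 0, _, _, passNum, neg =>
    -- fuel exhausted: unreachable for the fuel supplied at the call site
    if neg = 0 then passNum else -1
  | fuel + 1, m, front, passNum, neg =>
    if front = [] then (if neg = 0 then passNum else -1)
    else
      let r := passConvert m front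
      if r.1 = [] then (if neg = 0 then passNum else -1)
      else loopA fuel r.2 r.1 (passNum + 1) (neg - (r.1.length : Int))

def scanRowA (matrix : List (List Int)) (i : Int) (st : Int × List (Int × Int)) :
    Int × List (Int × Int) :=
  (PySem.List.pyRange 0 ((matrix.getD 0 []).length : Int) 1).foldl (fun st2 j =>
    if pvGetCell matrix i j < 0 then (st2.1 + 1, st2.2)
    else if pvGetCell matrix i j > 0 then (st2.1, st2.2 ++ [(i, j)])
    else st2) st

def scanA (matrix : List (List Int)) : Int × List (Int × Int) :=
  (PySem.List.pyRange 0 (matrix.length : Int) 1).foldl (fun st i => scanRowA matrix i st) (0, [])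

def minimumPassesOfMatrix (matrix : List (List Int)) : Int :=
  let s := scanA matrix
  loopA (pvNegCount matrix + 1) matrix s.2 0 s.1

-- ===== PORT B =====
-- the four neighbour candidates ((i-1,j),(i+1,j),(i,j-1),(i,j+1)) of a cell
def pvCand (c : Int × Int) : List (Int × Int) :=
  [(c.1 - 1, c.2), (c.1 + 1, c.2), (c.1, c.2 - 1), (c.1, c.2 + 1)]

-- `any(0 <= ni < rows and 0 <= nj < cols and matrix[ni][nj] > 0 for ni, nj in …)`
def pvHasPosNbr (m : List (List Int)) (rows cols i j : Int) : Bool :=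
  (pvCand (i, j)).any (fun c =>
    decide (0 ≤ c.1 ∧ c.1 < rows ∧ 0 ≤ c.2 ∧ c.2 < cols ∧ 0 < pvGetCell m c.1 c.2))

-- `for i in range(rows) for j in range(cols)`
def pvGridB (rows cols : Int) : List (Int × Int) :=
  (PySem.List.pyRange 0 rows 1).flatMap (fun i =>
    (PySem.List.pyRange 0 cols 1).map (fun j => (i, j)))

-- the `flips` comprehension of one sweep
def pvFlipsB (m : List (List Int)) (rows cols : Int) : List (Int × Int) :=
  (pvGridB rows cols).filter
    (fun c => decide (pvGetCell m c.1 c.2 < 0) && pvHasPosNbr m rows cols c.1 c.2)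

-- `all(matrix[i][j] >= 0 for i in range(rows) for j in range(cols))`
def pvAllNonneg (m : List (List Int)) (rows cols : Int) : Bool :=
  (pvGridB rows cols).all (fun c => decide (0 ≤ pvGetCell m c.1 c.2))

def loopB : Nat → Int → Int → List (List Int) → Int → Int
  | 0, rows, cols, m, passes =>
    -- fuel exhausted: unreachable for the fuel supplied at the call site
    if pvAllNonneg m rows cols then passes else -1
  | fuel + 1, rows, cols, m, passes =>
    let fl := pvFlipsB m rows cols
    if fl = [] then (if pvAllNonneg m rows cols then passes else -1)
    else loopB fuel rows cols (fl.foldl (fun mm c => pvFlipCell mm c.1 c.2) m) (passes + 1)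

def minimumPassesOfMatrix_alt (matrix : List (List Int)) : Int :=
  let rows := (matrix.length : Int)
  let cols : Int := if matrix.length ≠ 0 then ((matrix.getD 0 []).length : Int) else 0
  loopB (pvNegCount matrix + 1) rows cols matrix 0

-- ===== PRECONDITION & SPEC =====
-- Pre_ excludes exactly the inputs on which Python A raises IndexError: a nonempty matrix with some
-- row shorter than row 0 (both programs index every row up to len(matrix[0])); B raises there too.
def Pre_minimumPassesOfMatrix (matrix : List (List Int)) : Prop :=
  ∀ row ∈ matrix, (matrix.headD []).length ≤ row.length

instance (matrix : List (List Int)) : Decidable (Pre_minimumPassesOfMatrix matrix) := by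
  unfold Pre_minimumPassesOfMatrix; infer_instance

def pvWitness_minimumPassesOfMatrix : List (List Int) :=
  [[0, -1, -3, 2, 0], [1, -2, -5, -1, -3], [3, 0, 0, -4, -1]]

def Spec_minimumPassesOfMatrix (matrix : List (List Int)) (out : Int) : Prop := out = minimumPassesOfMatrix_alt matrix
instance (matrix : List (List Int)) (out : Int) : Decidable (Spec_minimumPassesOfMatrix matrix out) := by unfold Spec_minimumPassesOfMatrix; infer_instance

-- ===== CLAIM (what is proved, stated in full; the proofs are below) =====
def Claim_equal_minimumPassesOfMatrix : Prop := ∀ (matrix : List (List Int)), Dom_minimumPassesOfMatrix matrix → Pre_minimumPassesOfMatrix matrix → Spec_minimumPassesOfMatrix matrix (minimumPassesOfMatrix matrix)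

-- ===== LEMMAS AND PROOFS =====

-- in-bounds predicate for a cell of the rows × cols window
def pvInW (rows cols : Int) (c : Int × Int) : Prop :=
  0 ≤ c.1 ∧ c.1 < rows ∧ 0 ≤ c.2 ∧ c.2 < cols

-- number of negative cells of the window: A's running counter, and the loop measure of the proofs
def pvWNeg (m : List (List Int)) (rows cols : Int) : Nat :=
  ((pvGridB rows cols).filter (fun c => decide (pvGetCell m c.1 c.2 < 0))).length

-- the frontier invariant tying A's state to the matrix: frontier cells are in-window positives,
-- and every in-window negative that touches an in-window positive touches one in the frontier
def pvInv (rows cols : Int) (m : List (List Int)) (front : List (Int × Int)) : Prop :=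
  (∀ c ∈ front, pvInW rows cols c ∧ 0 < pvGetCell m c.1 c.2) ∧
  (∀ p : Int × Int, pvInW rows cols p → 0 < pvGetCell m p.1 p.2 → p ∉ front →
     ∀ c ∈ pvCand p, pvInW rows cols c → ¬ pvGetCell m c.1 c.2 < 0)

-- ---- basic flip lemmas ----
theorem pvNegRow_flip (r : List Int) (j : Nat) (h : r.getD j 0 < 0) :
    pvNegRow (pvFlipRowN r j) + 1 = pvNegRow r := by
  induction r generalizing j with
  | nil => simp [List.getD] at h
  | cons v t ih =>
    cases j with
    | zero =>
      simp only [List.getD_cons_zero] at h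
      have h2 : ¬(-v < 0) := by omega
      simp only [pvFlipRowN, pvNegRow, if_neg h2, if_pos h]
      omega
    | succ n =>
      simp only [List.getD_cons_succ] at h
      simp only [pvFlipRowN, pvNegRow]
      have := ih n h
      omega

theorem pvNegCount_flipN (m : List (List Int)) (i j : Nat) (h : (m.getD i []).getD j 0 < 0) :
    pvNegCount (pvFlipN m i j) + 1 = pvNegCount m := by
  induction m generalizing i with
  | nil => simp [List.getD] at h
  | cons r t ih =>
    cases i with
    | zero =>
      simp only [List.getD_cons_zero] at h
      simp only [pvFlipN, pvNegCount]
      have := pvNegRow_flip r j h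
      omega
    | succ n =>
      simp only [List.getD_cons_succ] at h
      simp only [pvFlipN, pvNegCount]
      have := ih n h
      omega

theorem pvGetCell_neg_bounds (m : List (List Int)) (i j : Int) (h : pvGetCell m i j < 0) :
    0 ≤ i ∧ 0 ≤ j := by
  by_cases hij : 0 ≤ i ∧ 0 ≤ j
  · exact hij
  · simp [pvGetCell, hij] at h

theorem pvNegCount_flipCell (m : List (List Int)) (i j : Int) (h : pvGetCell m i j < 0) :
    pvNegCount (pvFlipCell m i j) + 1 = pvNegCount m := by
  have hij := pvGetCell_neg_bounds m i j h
  simp [pvGetCell, hij] at h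
  simp [pvFlipCell, hij]
  exact pvNegCount_flipN m i.toNat j.toNat h

theorem pvGetD_flipRowN_ne (r : List Int) (j j' : Nat) (h : j' ≠ j) :
    (pvFlipRowN r j).getD j' 0 = r.getD j' 0 := by
  induction r generalizing j j' with
  | nil => simp [pvFlipRowN]
  | cons v t ih =>
    cases j with
    | zero => cases j' with
      | zero => omega
      | succ k => simp [pvFlipRowN, List.getD]
    | succ n => cases j' with
      | zero => simp [pvFlipRowN, List.getD]
      | succ k => simp [pvFlipRowN, List.getD]; exact ih n k (by omega)

theorem pvGetD_flipN_ne (m : List (List Int)) (i j i' j' : Nat) (h : ¬(i' = i ∧ j' = j)) :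
    ((pvFlipN m i j).getD i' []).getD j' 0 = (m.getD i' []).getD j' 0 := by
  induction m generalizing i i' with
  | nil => simp [pvFlipN]
  | cons r t ih =>
    cases i with
    | zero => cases i' with
      | zero => simp [pvFlipN, List.getD]; exact pvGetD_flipRowN_ne r j j' (by omega)
      | succ k => simp [pvFlipN, List.getD]
    | succ n => cases i' with
      | zero => simp [pvFlipN, List.getD]
      | succ k => simp [pvFlipN, List.getD]; exact ih n k (by omega)

theorem pvGetCell_flipCell_ne (m : List (List Int)) (i j i' j' : Int) (h : ¬((i', j') = (i, j))) :
    pvGetCell (pvFlipCell m i j) i' j' = pvGetCell m i' j' := by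
  by_cases hij : 0 ≤ i ∧ 0 ≤ j
  · by_cases hij' : 0 ≤ i' ∧ 0 ≤ j'
    · simp [pvFlipCell, pvGetCell, hij, hij']
      apply pvGetD_flipN_ne
      intro hc
      apply h
      have h1 : i' = i := by omega
      have h2 : j' = j := by omega
      simp [h1, h2]
    · simp [pvGetCell, hij']
  · simp [pvFlipCell, hij]

theorem pvGetD_flipRowN_self (r : List Int) (j : Nat) (h : r.getD j 0 < 0) :
    (pvFlipRowN r j).getD j 0 = -(r.getD j 0) := by
  induction r generalizing j with
  | nil => simp [List.getD] at h
  | cons v t ih =>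
    cases j with
    | zero => simp [pvFlipRowN, List.getD]
    | succ n =>
      simp only [List.getD_cons_succ] at h
      simp only [pvFlipRowN, List.getD_cons_succ]
      exact ih n h

theorem pvGetD_flipN_self (m : List (List Int)) (i j : Nat) (h : (m.getD i []).getD j 0 < 0) :
    ((pvFlipN m i j).getD i []).getD j 0 = -((m.getD i []).getD j 0) := by
  induction m generalizing i with
  | nil => simp [List.getD] at h
  | cons r t ih =>
    cases i with
    | zero =>
      simp only [List.getD_cons_zero] at h ⊢
      simp only [pvFlipN, List.getD_cons_zero]
      exact pvGetD_flipRowN_self r j h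
    | succ n =>
      simp only [List.getD_cons_succ] at h ⊢
      simp only [pvFlipN, List.getD_cons_succ]
      exact ih n h

theorem pvGetCell_flipCell_self (m : List (List Int)) (i j : Int) (h : pvGetCell m i j < 0) :
    pvGetCell (pvFlipCell m i j) i j = -(pvGetCell m i j) := by
  have hij := pvGetCell_neg_bounds m i j h
  simp [pvGetCell, hij] at h ⊢
  simp [pvFlipCell, hij]
  exact pvGetD_flipN_self m i.toNat j.toNat h

-- value of every cell after flipping a nodup list of currently-negative cells
theorem pvFlipAll_get (S : List (Int × Int)) :
    ∀ (m : List (List Int)) (c : Int × Int), S.Nodup →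
    (∀ x ∈ S, pvGetCell m x.1 x.2 < 0) →
    pvGetCell (S.foldl (fun mm x => pvFlipCell mm x.1 x.2) m) c.1 c.2
      = if c ∈ S then -(pvGetCell m c.1 c.2) else pvGetCell m c.1 c.2 := by
  induction S with
  | nil => intro m c _ _; simp
  | cons a t ih =>
    intro m c hnd hall
    have hnd' := List.nodup_cons.mp hnd
    have ha := hall a (by simp)
    have ht : ∀ x ∈ t, pvGetCell (pvFlipCell m a.1 a.2) x.1 x.2 < 0 := by
      intro x hx
      have hne : ¬((x.1, x.2) = (a.1, a.2)) := by
        intro he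
        have hxa : x = a := by cases a; cases x; simpa using he
        exact hnd'.1 (hxa ▸ hx)
      rw [pvGetCell_flipCell_ne _ _ _ _ _ hne]
      exact hall x (by simp [hx])
    rw [List.foldl_cons, ih (pvFlipCell m a.1 a.2) c hnd'.2 ht]
    by_cases hca : c = a
    · subst hca
      have hnt : c ∉ t := hnd'.1
      simp [hnt, pvGetCell_flipCell_self m c.1 c.2 ha]
    · have hne : ¬((c.1, c.2) = (a.1, a.2)) := by
        intro he
        exact hca (by cases a; cases c; simpa using he)
      rw [pvGetCell_flipCell_ne _ _ _ _ _ hne]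
      by_cases hct : c ∈ t <;> simp [hct, hca]

-- nodup facts about the candidate lists
theorem pvCand_nodup (c : Int × Int) : (pvCand c).Nodup := by
  simp [pvCand, List.nodup_cons, List.mem_cons, Prod.ext_iff]
  omega

theorem pvNbrsA_sublist (i j rows cols : Int) :
    (pvNbrsA i j rows cols).Sublist (pvCand (i, j)) := by
  have h : ∀ (c : Prop) [Decidable c] (x : Int × Int), (if c then [x] else []).Sublist [x] := by
    intro c _ x; split <;> simp
  exact ((h _ _).append (h _ _)).append ((h _ _).append (h _ _))

theorem pvNbrsA_nodup (i j rows cols : Int) : (pvNbrsA i j rows cols).Nodup := by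
  exact (pvCand_nodup (i, j)).sublist (pvNbrsA_sublist i j rows cols)

-- flipping a list of pairwise-distinct currently-negative cells removes exactly that many negatives
theorem pvNegCount_flipAll (ns : List (Int × Int)) (m : List (List Int))
    (hnd : ns.Nodup) (hneg : ∀ c ∈ ns, pvGetCell m c.1 c.2 < 0) :
    pvNegCount (ns.foldl (fun mm c => pvFlipCell mm c.1 c.2) m) + ns.length = pvNegCount m := by
  induction ns generalizing m with
  | nil => simp
  | cons c t ih =>
    simp only [List.foldl_cons, List.length_cons]
    have hc := hneg c (by simp)
    have ht : ∀ c' ∈ t, pvGetCell (pvFlipCell m c.1 c.2) c'.1 c'.2 < 0 := by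
      intro c' hc'
      have hne : ¬((c'.1, c'.2) = (c.1, c.2)) := by
        intro he
        have : c' = c := by
          cases c; cases c'; simpa using he
        exact (List.nodup_cons.mp hnd).1 (this ▸ hc')
      rw [pvGetCell_flipCell_ne _ _ _ _ _ hne]
      exact hneg c' (by simp [hc'])
    have := ih (pvFlipCell m c.1 c.2) (List.nodup_cons.mp hnd).2 ht
    have := pvNegCount_flipCell m c.1 c.2 hc
    omega

theorem pvConvert_negCount (i j : Int) (m : List (List Int)) :
    pvNegCount (convertNegNeighbors i j m).2 + (convertNegNeighbors i j m).1.length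
      = pvNegCount m := by
  unfold convertNegNeighbors
  exact pvNegCount_flipAll _ m ((pvNbrsA_nodup _ _ _ _).filter _)
    (fun c hc => by simpa using (List.of_mem_filter hc))

theorem pvPassFold_negCount (front : List (Int × Int)) :
    ∀ (a : List (Int × Int)) (m : List (List Int)),
    pvNegCount (front.foldl (fun st c =>
      let r := convertNegNeighbors c.1 c.2 st.2
      (st.1 ++ r.1, r.2)) (a, m)).2
    + (front.foldl (fun st c =>
      let r := convertNegNeighbors c.1 c.2 st.2
      (st.1 ++ r.1, r.2)) (a, m)).1.length
    = pvNegCount m + a.length := by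
  induction front with
  | nil => simp
  | cons c t ih =>
    intro a m
    simp only [List.foldl_cons]
    have h1 := pvConvert_negCount c.1 c.2 m
    have h2 := ih (a ++ (convertNegNeighbors c.1 c.2 m).1) (convertNegNeighbors c.1 c.2 m).2
    simp at h2
    omega

theorem pvPassConvert_negCount (m : List (List Int)) (front : List (Int × Int)) :
    pvNegCount (passConvert m front).2 + (passConvert m front).1.length = pvNegCount m := by
  have := pvPassFold_negCount front [] m
  simpa [passConvert] using this

-- dimensions are preserved by a flip
theorem pvLength_flipRowN (r : List Int) (j : Nat) : (pvFlipRowN r j).length = r.length := by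
  induction r generalizing j with
  | nil => simp [pvFlipRowN]
  | cons v t ih => cases j with
    | zero => simp [pvFlipRowN]
    | succ n => simp [pvFlipRowN, ih n]

theorem pvLength_flipCell (m : List (List Int)) (i j : Int) :
    (pvFlipCell m i j).length = m.length := by
  unfold pvFlipCell
  split
  · rename_i hij
    generalize i.toNat = a
    induction m generalizing a with
    | nil => simp [pvFlipN]
    | cons r t ih => cases a with
      | zero => simp [pvFlipN]
      | succ n => simp [pvFlipN, ih n]
  · rfl

theorem pvRowLenN (m : List (List Int)) (a j k : Nat) :
    ((pvFlipN m a j).getD k []).length = (m.getD k []).length := by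
  induction m generalizing a k with
  | nil => simp [pvFlipN]
  | cons r t ih =>
    cases a with
    | zero => cases k with
      | zero => simp [pvFlipN, pvLength_flipRowN]
      | succ k' => simp [pvFlipN]
    | succ n => cases k with
      | zero => simp [pvFlipN]
      | succ k' => simp only [pvFlipN, List.getD_cons_succ]; exact ih n k'

theorem pvRowLen_flipCell (m : List (List Int)) (i j : Int) (k : Nat) :
    ((pvFlipCell m i j).getD k []).length = (m.getD k []).length := by
  unfold pvFlipCell
  split
  · exact pvRowLenN m i.toNat j.toNat k
  · rfl

theorem pvFlipAll_length (ns : List (Int × Int)) :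
    ∀ m : List (List Int), (ns.foldl (fun mm c => pvFlipCell mm c.1 c.2) m).length = m.length := by
  induction ns with
  | nil => intro m; rfl
  | cons c t ih => intro m; rw [List.foldl_cons, ih, pvLength_flipCell]

theorem pvFlipAll_row0 (ns : List (Int × Int)) :
    ∀ m : List (List Int),
      ((ns.foldl (fun mm c => pvFlipCell mm c.1 c.2) m).getD 0 []).length
        = (m.getD 0 []).length := by
  induction ns with
  | nil => intro m; rfl
  | cons c t ih => intro m; rw [List.foldl_cons, ih, pvRowLen_flipCell]

theorem pvConvert_dims (i j : Int) (m : List (List Int)) :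
    (convertNegNeighbors i j m).2.length = m.length ∧
      ((convertNegNeighbors i j m).2.getD 0 []).length = (m.getD 0 []).length := by
  dsimp only [convertNegNeighbors]
  exact ⟨pvFlipAll_length _ m, pvFlipAll_row0 _ m⟩

-- the pass fold with a nonempty accumulator
theorem pvPassConvert_acc (front : List (Int × Int)) :
    ∀ (a : List (Int × Int)) (m : List (List Int)),
    front.foldl (fun st c =>
        let r := convertNegNeighbors c.1 c.2 st.2
        (st.1 ++ r.1, r.2)) (a, m)
      = (a ++ (passConvert m front).1, (passConvert m front).2) := by
  induction front with
  | nil => intro a m; simp [passConvert]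
  | cons c t ih =>
    intro a m
    simp only [passConvert, List.foldl_cons]
    rw [ih, ih]
    simp [List.append_assoc]

theorem pvPassConvert_cons (c : Int × Int) (t : List (Int × Int)) (m : List (List Int)) :
    passConvert m (c :: t)
      = ((convertNegNeighbors c.1 c.2 m).1 ++ (passConvert (convertNegNeighbors c.1 c.2 m).2 t).1,
         (passConvert (convertNegNeighbors c.1 c.2 m).2 t).2) := by
  simp only [passConvert, List.foldl_cons]
  rw [pvPassConvert_acc]
  simp only [List.nil_append, Prod.mk.injEq]
  exact ⟨rfl, rfl⟩

theorem pvPassConvert_dims (front : List (Int × Int)) :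
    ∀ m : List (List Int),
    (passConvert m front).2.length = m.length ∧
      ((passConvert m front).2.getD 0 []).length = (m.getD 0 []).length := by
  induction front with
  | nil => intro m; simp [passConvert]
  | cons c t ih =>
    intro m
    rw [pvPassConvert_cons]
    have h1 := pvConvert_dims c.1 c.2 m
    have h2 := ih (convertNegNeighbors c.1 c.2 m).2
    exact ⟨by rw [h2.1, h1.1], by rw [h2.2, h1.2]⟩

-- A's pass result matrix is exactly "flip every cell of the pass's flip list"
theorem pvPC_matrix (front : List (Int × Int)) :
    ∀ m : List (List Int),
    (passConvert m front).2
      = (passConvert m front).1.foldl (fun mm c => pvFlipCell mm c.1 c.2) m := by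
  induction front with
  | nil => intro m; simp [passConvert]
  | cons c t ih =>
    intro m
    rw [pvPassConvert_cons, List.foldl_append]
    dsimp only
    have hm : (convertNegNeighbors c.1 c.2 m).2
        = (convertNegNeighbors c.1 c.2 m).1.foldl (fun mm x => pvFlipCell mm x.1 x.2) m := rfl
    rw [ih (convertNegNeighbors c.1 c.2 m).2, hm]

-- membership in the candidate list is symmetric
theorem pvCand_symm (c f : Int × Int) : c ∈ pvCand f ↔ f ∈ pvCand c := by
  simp [pvCand, Prod.ext_iff]
  omega

-- A's guarded neighbour list, characterised (for an in-window centre)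
theorem pvMem_nbrsA (rows cols i j : Int) (c : Int × Int) :
    c ∈ pvNbrsA i j rows cols ↔
      ((0 < i ∧ c = (i - 1, j)) ∨ (i < rows - 1 ∧ c = (i + 1, j)) ∨
       (0 < j ∧ c = (i, j - 1)) ∨ (j < cols - 1 ∧ c = (i, j + 1))) := by
  unfold pvNbrsA
  by_cases h1 : 0 < i <;> by_cases h2 : i < rows - 1 <;>
    by_cases h3 : 0 < j <;> by_cases h4 : j < cols - 1 <;>
    simp [h1, h2, h3, h4]

theorem pvMem_nbrsA_iff (rows cols i j : Int) (hb : pvInW rows cols (i, j)) (c : Int × Int) :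
    c ∈ pvNbrsA i j rows cols ↔ (pvInW rows cols c ∧ c ∈ pvCand (i, j)) := by
  obtain ⟨hb1, hb2, hb3, hb4⟩ := hb
  rw [pvMem_nbrsA]
  simp only [pvCand, pvInW, List.mem_cons, List.not_mem_nil, or_false]
  constructor
  · rintro (⟨h, rfl⟩ | ⟨h, rfl⟩ | ⟨h, rfl⟩ | ⟨h, rfl⟩) <;>
      refine ⟨⟨by omega, by omega, by omega, by omega⟩, by simp⟩
  · rintro ⟨⟨w1, w2, w3, w4⟩, (rfl | rfl | rfl | rfl)⟩ <;> simp at w1 w2 w3 w4 ⊢ <;> omega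

-- grid membership and nodup
theorem pvMem_gridB (rows cols : Int) (c : Int × Int) :
    c ∈ pvGridB rows cols ↔ pvInW rows cols c := by
  simp only [pvGridB, List.mem_flatMap, List.mem_map, PySem.List.mem_pyRange_one, pvInW]
  constructor
  · rintro ⟨i, hi, j, hj, rfl⟩
    exact ⟨hi.1, hi.2, hj.1, hj.2⟩
  · rintro ⟨h1, h2, h3, h4⟩
    exact ⟨c.1, ⟨h1, h2⟩, c.2, ⟨h3, h4⟩, rfl⟩

theorem pvNodup_gridB (rows cols : Int) : (pvGridB rows cols).Nodup := by
  apply List.nodup_flatMap.2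
  constructor
  · intro i _
    exact (PySem.List.nodup_pyRange_one 0 cols).map (fun a b h => by simpa using h)
  · refine (PySem.List.pairwise_lt_pyRange_one 0 rows).imp ?_
    intro a b hab x hxa hxb
    simp only [List.mem_map] at hxa hxb
    obtain ⟨j1, _, rfl⟩ := hxa
    obtain ⟨j2, _, he⟩ := hxb
    have : b = a := congrArg Prod.fst he
    omega

-- one sweep's flip list, characterised
theorem pvMem_flipsB (m : List (List Int)) (rows cols : Int) (c : Int × Int) :
    c ∈ pvFlipsB m rows cols ↔
      (pvInW rows cols c ∧ pvGetCell m c.1 c.2 < 0 ∧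
       ∃ n ∈ pvCand c, pvInW rows cols n ∧ 0 < pvGetCell m n.1 n.2) := by
  simp only [pvFlipsB, List.mem_filter, pvMem_gridB, Bool.and_eq_true, decide_eq_true_eq,
    pvHasPosNbr, List.any_eq_true, pvInW]
  constructor
  · rintro ⟨hg, hneg, n, hn, hcond⟩
    exact ⟨hg, hneg, n, hn, ⟨hcond.1, hcond.2.1, hcond.2.2.1, hcond.2.2.2.1⟩, hcond.2.2.2.2⟩
  · rintro ⟨hg, hneg, n, hn, hw, hp⟩
    exact ⟨hg, hneg, n, hn, ⟨hw.1, hw.2.1, hw.2.2.1, hw.2.2.2, hp⟩⟩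

-- characterisation of one whole A-pass: its flip list is nodup, consists of cells negative at
-- pass start, and contains exactly the pass-start negatives adjacent to a frontier cell
theorem pvPC_char (rows cols : Int) :
    ∀ (front : List (Int × Int)) (m : List (List Int)),
    rows = (m.length : Int) → cols = ((m.getD 0 []).length : Int) →
    ((passConvert m front).1.Nodup ∧
     (∀ x ∈ (passConvert m front).1, pvGetCell m x.1 x.2 < 0) ∧
     (∀ c, c ∈ (passConvert m front).1 ↔
        (pvGetCell m c.1 c.2 < 0 ∧ ∃ f ∈ front, c ∈ pvNbrsA f.1 f.2 rows cols))) := by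
  intro front
  induction front with
  | nil =>
    intro m _ _
    simp [passConvert]
  | cons f t ih =>
    intro m hrows hcols
    rw [pvPassConvert_cons]
    have hns : (convertNegNeighbors f.1 f.2 m).1
        = (pvNbrsA f.1 f.2 rows cols).filter (fun c => decide (pvGetCell m c.1 c.2 < 0)) := by
      rw [hrows, hcols]; rfl
    have hm1 : (convertNegNeighbors f.1 f.2 m).2
        = (convertNegNeighbors f.1 f.2 m).1.foldl (fun mm x => pvFlipCell mm x.1 x.2) m := rfl
    set ns := (convertNegNeighbors f.1 f.2 m).1 with hnsdef
    have hnsN : ns.Nodup := by rw [hns]; exact (pvNbrsA_nodup _ _ _ _).filter _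
    have hnsneg : ∀ x ∈ ns, pvGetCell m x.1 x.2 < 0 := by
      intro x hx
      rw [hns] at hx
      simpa using (List.of_mem_filter hx)
    have hget : ∀ c : Int × Int, pvGetCell (convertNegNeighbors f.1 f.2 m).2 c.1 c.2
        = if c ∈ ns then -(pvGetCell m c.1 c.2) else pvGetCell m c.1 c.2 := by
      intro c
      rw [hm1]
      exact pvFlipAll_get ns m c hnsN hnsneg
    have hdm := pvConvert_dims f.1 f.2 m
    have ih' := ih (convertNegNeighbors f.1 f.2 m).2 (by rw [hrows, hdm.1]) (by rw [hcols, hdm.2])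
    obtain ⟨ihN, ihneg, ihiff⟩ := ih'
    have htrans : ∀ x : Int × Int,
        pvGetCell (convertNegNeighbors f.1 f.2 m).2 x.1 x.2 < 0 → pvGetCell m x.1 x.2 < 0 := by
      intro x hx
      rw [hget x] at hx
      by_cases hxn : x ∈ ns
      · have := hnsneg x hxn; simp [hxn] at hx; omega
      · simpa [hxn] using hx
    have hdisj : ∀ x ∈ ns, x ∉ (passConvert (convertNegNeighbors f.1 f.2 m).2 t).1 := by
      intro x hx hmem
      have h1 := ihneg x hmem
      rw [hget x, if_pos hx] at h1
      have := hnsneg x hx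
      omega
    refine ⟨?_, ?_, ?_⟩
    · exact List.Nodup.append hnsN ihN (fun x hx => hdisj x hx)
    · intro x hx
      rcases List.mem_append.mp hx with h | h
      · exact hnsneg x h
      · exact htrans x (ihneg x h)
    · intro c
      constructor
      · intro hc
        rcases List.mem_append.mp hc with h | h
        · refine ⟨hnsneg c h, f, by simp, ?_⟩
          rw [hns] at h
          exact (List.mem_filter.mp h).1
        · obtain ⟨hneg1, g, hg, hgm⟩ := (ihiff c).mp h
          exact ⟨htrans c hneg1, g, by simp [hg], hgm⟩
      · rintro ⟨hneg, g, hg, hgm⟩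
        rcases List.mem_cons.mp hg with rfl | hg'
        · apply List.mem_append_left
          rw [hns]
          exact List.mem_filter.mpr ⟨hgm, by simpa using hneg⟩
        · by_cases hcn : c ∈ ns
          · exact List.mem_append_left _ hcn
          · apply List.mem_append_right
            apply (ihiff c).mpr
            refine ⟨?_, g, hg', hgm⟩
            rw [hget c, if_neg hcn]
            exact hneg

-- under the invariant, A's pass flips exactly the cells of B's sweep
theorem pvSetEq (rows cols : Int) (m : List (List Int)) (front : List (Int × Int))
    (hrows : rows = (m.length : Int)) (hcols : cols = ((m.getD 0 []).length : Int))
    (hinv : pvInv rows cols m front) :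
    ∀ c, c ∈ (passConvert m front).1 ↔ c ∈ pvFlipsB m rows cols := by
  obtain ⟨-, -, hiff⟩ := pvPC_char rows cols front m hrows hcols
  intro c
  rw [hiff c, pvMem_flipsB]
  constructor
  · rintro ⟨hneg, f, hf, hfm⟩
    obtain ⟨hfw, hfp⟩ := hinv.1 f hf
    have := (pvMem_nbrsA_iff rows cols f.1 f.2 hfw c).mp hfm
    exact ⟨this.1, hneg, f, (pvCand_symm c f).mp this.2, hfw, hfp⟩
  · rintro ⟨hcw, hneg, n, hn, hnw, hnp⟩
    have hnf : n ∈ front := by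
      by_contra hnot
      exact hinv.2 n hnw hnp hnot c ((pvCand_symm n c).mp hn) hcw hneg
    refine ⟨hneg, n, hnf, ?_⟩
    exact (pvMem_nbrsA_iff rows cols n.1 n.2 hnw c).mpr ⟨hcw, (pvCand_symm n c).mp hn⟩

-- the invariant survives one pass (with the pass's flip list as the new frontier)
theorem pvInv_step (rows cols : Int) (m : List (List Int)) (front : List (Int × Int))
    (hrows : rows = (m.length : Int)) (hcols : cols = ((m.getD 0 []).length : Int))
    (hinv : pvInv rows cols m front) :
    pvInv rows cols
      ((passConvert m front).1.foldl (fun mm c => pvFlipCell mm c.1 c.2) m)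
      (passConvert m front).1 := by
  obtain ⟨hN, hneg, -⟩ := pvPC_char rows cols front m hrows hcols
  have hget := fun c => pvFlipAll_get (passConvert m front).1 m c hN hneg
  have hseteq := pvSetEq rows cols m front hrows hcols hinv
  constructor
  · intro c hc
    have hw := ((pvMem_flipsB m rows cols c).mp ((hseteq c).mp hc)).1
    refine ⟨hw, ?_⟩
    rw [hget c, if_pos hc]
    have := hneg c hc
    omega
  · intro p hpw hpp hpn c hc hcw hcneg
    by_cases hcS : c ∈ (passConvert m front).1
    · rw [hget c, if_pos hcS] at hcneg
      have := hneg c hcS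
      omega
    · rw [hget c, if_neg hcS] at hcneg
      rw [hget p, if_neg hpn] at hpp
      apply hcS
      apply (hseteq c).mpr
      exact (pvMem_flipsB m rows cols c).mpr
        ⟨hcw, hcneg, p, (pvCand_symm c p).mp hc, hpw, hpp⟩

-- flips of single cells commute
theorem pvFlipRowN_comm (r : List Int) : ∀ j j' : Nat,
    pvFlipRowN (pvFlipRowN r j) j' = pvFlipRowN (pvFlipRowN r j') j := by
  induction r with
  | nil => intro j j'; simp [pvFlipRowN]
  | cons v t ih =>
    intro j j'
    cases j with
    | zero => cases j' with
      | zero => simp [pvFlipRowN]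
      | succ b => simp [pvFlipRowN]
    | succ a => cases j' with
      | zero => simp [pvFlipRowN]
      | succ b => simp [pvFlipRowN, ih a b]

theorem pvFlipN_comm (m : List (List Int)) : ∀ i j i' j' : Nat,
    pvFlipN (pvFlipN m i j) i' j' = pvFlipN (pvFlipN m i' j') i j := by
  induction m with
  | nil => intro i j i' j'; simp [pvFlipN]
  | cons r t ih =>
    intro i j i' j'
    cases i with
    | zero => cases i' with
      | zero => simp [pvFlipN, pvFlipRowN_comm]
      | succ b => simp [pvFlipN]
    | succ a => cases i' with
      | zero => simp [pvFlipN]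
      | succ b => simp [pvFlipN, ih a j b j']

theorem pvFlipCell_comm (m : List (List Int)) (a b : Int × Int) :
    pvFlipCell (pvFlipCell m a.1 a.2) b.1 b.2 = pvFlipCell (pvFlipCell m b.1 b.2) a.1 a.2 := by
  unfold pvFlipCell
  by_cases ha : 0 ≤ a.1 ∧ 0 ≤ a.2 <;> by_cases hb : 0 ≤ b.1 ∧ 0 ≤ b.2 <;>
    simp [ha, hb, pvFlipN_comm]

-- window negative count: zero iff B's final all() check passes
theorem pvWNeg_eq_zero_iff (m : List (List Int)) (rows cols : Int) :
    pvWNeg m rows cols = 0 ↔ pvAllNonneg m rows cols = true := by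
  simp only [pvWNeg, pvAllNonneg, List.length_eq_zero_iff, List.filter_eq_nil_iff,
    List.all_eq_true, decide_eq_true_eq]
  constructor
  · intro h c hc
    have := h c hc
    omega
  · intro h c hc
    have := h c hc
    omega

-- window negative count drops by exactly the number of flipped cells
theorem pvWNeg_step (m : List (List Int)) (rows cols : Int) (S : List (Int × Int))
    (hN : S.Nodup) (hsub : ∀ c ∈ S, c ∈ pvGridB rows cols)
    (hneg : ∀ c ∈ S, pvGetCell m c.1 c.2 < 0) :
    pvWNeg (S.foldl (fun mm c => pvFlipCell mm c.1 c.2) m) rows cols + S.length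
      = pvWNeg m rows cols := by
  have hget := fun c => pvFlipAll_get S m c hN hneg
  have hXN : ((pvGridB rows cols).filter (fun c => decide (pvGetCell m c.1 c.2 < 0))).Nodup :=
    (pvNodup_gridB rows cols).filter _
  have hsplit : ((pvGridB rows cols).filter (fun c => decide (pvGetCell m c.1 c.2 < 0))).length
      = (((pvGridB rows cols).filter (fun c => decide (pvGetCell m c.1 c.2 < 0))).filter
          (fun c => decide (c ∈ S))).length
      + (((pvGridB rows cols).filter (fun c => decide (pvGetCell m c.1 c.2 < 0))).filter
          (fun c => !decide (c ∈ S))).length :=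
    List.length_eq_length_filter_add _
  have hperm : (((pvGridB rows cols).filter (fun c => decide (pvGetCell m c.1 c.2 < 0))).filter
      (fun c => decide (c ∈ S))).Perm S := by
    apply (List.perm_ext_iff_of_nodup (hXN.filter _) hN).mpr
    intro a
    constructor
    · intro h
      exact of_decide_eq_true (List.mem_filter.mp h).2
    · intro h
      exact List.mem_filter.mpr
        ⟨List.mem_filter.mpr ⟨hsub a h, decide_eq_true (hneg a h)⟩, decide_eq_true h⟩
  have hlen2 := hperm.length_eq
  have hrest : ((pvGridB rows cols).filter (fun c => decide (pvGetCell m c.1 c.2 < 0))).filter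
        (fun c => !decide (c ∈ S))
      = (pvGridB rows cols).filter
          (fun c => decide (pvGetCell (S.foldl (fun mm c => pvFlipCell mm c.1 c.2) m) c.1 c.2 < 0)) := by
    rw [List.filter_filter]
    apply List.filter_congr
    intro c _
    by_cases hcS : c ∈ S
    · have h1 := hget c
      rw [if_pos hcS] at h1
      have h2 := hneg c hcS
      simp [hcS, h1]
      omega
    · have h1 := hget c
      rw [if_neg hcS] at h1
      simp [hcS, h1]
  unfold pvWNeg
  rw [← hrest]
  omega

-- a negative cell anywhere makes the total negative count positive
theorem pvNegRow_pos (r : List Int) (b : Nat) (h : r.getD b 0 < 0) : 0 < pvNegRow r := by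
  induction r generalizing b with
  | nil => simp [List.getD] at h
  | cons v t ih =>
    cases b with
    | zero => simp only [List.getD_cons_zero] at h; simp [pvNegRow, h]
    | succ n =>
      simp only [List.getD_cons_succ] at h
      have := ih n h
      simp only [pvNegRow]
      omega

theorem pvNegCount_pos_aux (m : List (List Int)) : ∀ (a b : Nat),
    (m.getD a []).getD b 0 < 0 → 0 < pvNegCount m := by
  induction m with
  | nil => intro a b h; simp [List.getD] at h
  | cons r t ih =>
    intro a b h
    cases a with
    | zero =>
      simp only [List.getD_cons_zero] at h
      have := pvNegRow_pos r b h
      simp only [pvNegCount]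
      omega
    | succ n =>
      simp only [List.getD_cons_succ] at h
      have := ih n b h
      simp only [pvNegCount]
      omega

theorem pvNegCount_pos (m : List (List Int)) (i j : Int) (h : pvGetCell m i j < 0) :
    0 < pvNegCount m := by
  have hij := pvGetCell_neg_bounds m i j h
  simp only [pvGetCell, if_pos hij] at h
  exact pvNegCount_pos_aux m i.toNat j.toNat h

-- characterisation of A's initial scan: negatives counted, window positives collected in grid order
theorem pvScanRowA_char (matrix : List (List Int)) (i : Int) :
    ∀ (l : List Int) (st : Int × List (Int × Int)),
    l.foldl (fun st2 j =>
        if pvGetCell matrix i j < 0 then (st2.1 + 1, st2.2)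
        else if pvGetCell matrix i j > 0 then (st2.1, st2.2 ++ [(i, j)])
        else st2) st
      = (st.1 + (((l.map (fun j => (i, j))).filter
            (fun c => decide (pvGetCell matrix c.1 c.2 < 0))).length : Int),
         st.2 ++ (l.map (fun j => (i, j))).filter
            (fun c => decide (0 < pvGetCell matrix c.1 c.2))) := by
  intro l
  induction l with
  | nil => intro st; simp
  | cons j t ih =>
    intro st
    simp only [List.foldl_cons, List.map_cons, List.filter_cons]
    by_cases hneg : pvGetCell matrix i j < 0
    · have hpos : ¬(0 < pvGetCell matrix i j) := by omega
      rw [if_pos hneg, ih (st.1 + 1, st.2)]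
      simp [hneg, hpos]
      ring
    · by_cases hpos : pvGetCell matrix i j > 0
      · rw [if_neg hneg, if_pos hpos, ih (st.1, st.2 ++ [(i, j)])]
        simp [hneg, hpos]
      · rw [if_neg hneg, if_neg hpos, ih st]
        have hpos' : ¬(0 < pvGetCell matrix i j) := hpos
        simp [hneg, hpos']

theorem pvScanA_char (matrix : List (List Int)) :
    scanA matrix
      = ((pvWNeg matrix (matrix.length : Int) ((matrix.getD 0 []).length : Int) : Int),
         (pvGridB (matrix.length : Int) ((matrix.getD 0 []).length : Int)).filter
           (fun c => decide (0 < pvGetCell matrix c.1 c.2))) := by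
  unfold scanA pvWNeg pvGridB
  have key : ∀ (li : List Int) (st : Int × List (Int × Int)),
      li.foldl (fun st i => scanRowA matrix i st) st
        = (st.1 + (((li.flatMap (fun i =>
              (PySem.List.pyRange 0 ((matrix.getD 0 []).length : Int) 1).map (fun j => (i, j)))).filter
              (fun c => decide (pvGetCell matrix c.1 c.2 < 0))).length : Int),
           st.2 ++ (li.flatMap (fun i =>
              (PySem.List.pyRange 0 ((matrix.getD 0 []).length : Int) 1).map (fun j => (i, j)))).filter
              (fun c => decide (0 < pvGetCell matrix c.1 c.2))) := by
    intro li
    induction li with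
    | nil => intro st; simp
    | cons i t ih =>
      intro st
      simp only [List.foldl_cons, List.flatMap_cons, List.filter_append, List.length_append]
      rw [show scanRowA matrix i st
          = (st.1 + ((((PySem.List.pyRange 0 ((matrix.getD 0 []).length : Int) 1).map
                (fun j => (i, j))).filter
                (fun c => decide (pvGetCell matrix c.1 c.2 < 0))).length : Int),
             st.2 ++ ((PySem.List.pyRange 0 ((matrix.getD 0 []).length : Int) 1).map
                (fun j => (i, j))).filter
                (fun c => decide (0 < pvGetCell matrix c.1 c.2)))
          from pvScanRowA_char matrix i _ st]
      rw [ih]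
      simp only [Prod.mk.injEq]
      refine ⟨by push_cast; ring, by simp [List.append_assoc]⟩
  have := key (PySem.List.pyRange 0 (matrix.length : Int) 1) (0, [])
  simp only [zero_add, List.nil_append] at this
  exact this

-- the invariant holds initially, with all window positives as the frontier
theorem pvInv_init (matrix : List (List Int)) (rows cols : Int) :
    pvInv rows cols matrix
      ((pvGridB rows cols).filter (fun c => decide (0 < pvGetCell matrix c.1 c.2))) := by
  constructor
  · intro c hc
    have h := List.mem_filter.mp hc
    exact ⟨(pvMem_gridB rows cols c).mp h.1, by simpa using h.2⟩
  · intro p hpw hpp hpn _ _ _ _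
    exact absurd (List.mem_filter.mpr ⟨(pvMem_gridB rows cols p).mpr hpw, by simpa using hpp⟩) hpn

-- unfoldings of the two loops at positive fuel
theorem loopA_succ_nil (a : Nat) (m : List (List Int)) (front : List (Int × Int)) (pass neg : Int)
    (h : front = []) :
    loopA (a + 1) m front pass neg = (if neg = 0 then pass else -1) := by
  rw [loopA, if_pos h]

theorem loopA_succ_stop (a : Nat) (m : List (List Int)) (front : List (Int × Int)) (pass neg : Int)
    (hfe : front ≠ []) (hS : (passConvert m front).1 = []) :
    loopA (a + 1) m front pass neg = (if neg = 0 then pass else -1) := by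
  rw [loopA, if_neg hfe]
  dsimp only
  rw [if_pos hS]

theorem loopA_succ_go (a : Nat) (m : List (List Int)) (front : List (Int × Int)) (pass neg : Int)
    (hfe : front ≠ []) (hS : (passConvert m front).1 ≠ []) :
    loopA (a + 1) m front pass neg
      = loopA a (passConvert m front).2 (passConvert m front).1 (pass + 1)
          (neg - ((passConvert m front).1.length : Int)) := by
  rw [loopA, if_neg hfe]
  dsimp only
  rw [if_neg hS]

theorem loopB_succ_nil (b : Nat) (rows cols : Int) (m : List (List Int)) (passes : Int)
    (h : pvFlipsB m rows cols = []) :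
    loopB (b + 1) rows cols m passes = (if pvAllNonneg m rows cols then passes else -1) := by
  rw [loopB]
  simp [h]

theorem loopB_succ_go (b : Nat) (rows cols : Int) (m : List (List Int)) (passes : Int)
    (h : pvFlipsB m rows cols ≠ []) :
    loopB (b + 1) rows cols m passes
      = loopB b rows cols
          ((pvFlipsB m rows cols).foldl (fun mm c => pvFlipCell mm c.1 c.2) m) (passes + 1) := by
  rw [loopB, if_neg h]

-- MAIN: A's frontier loop equals B's sweep loop, by induction on the negatives left
theorem pvMain : ∀ (n : Nat) (rows cols : Int) (fA fB : Nat) (m : List (List Int))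
    (front : List (Int × Int)) (pass neg : Int),
    pvNegCount m ≤ n → n < fA → n < fB →
    rows = (m.length : Int) → cols = ((m.getD 0 []).length : Int) →
    pvInv rows cols m front →
    neg = (pvWNeg m rows cols : Int) →
    loopA fA m front pass neg = loopB fB rows cols m pass := by
  intro n
  induction n with
  | zero =>
    intro rows cols fA fB m front pass neg hn hfA hfB hrows hcols hinv hneg
    obtain ⟨a, rfl⟩ : ∃ a, fA = a + 1 := ⟨fA - 1, by omega⟩
    obtain ⟨b, rfl⟩ : ∃ b, fB = b + 1 := ⟨fB - 1, by omega⟩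
    have hS : (passConvert m front).1 = [] := by
      rw [List.eq_nil_iff_forall_not_mem]
      intro c hc
      have h1 := (pvPC_char rows cols front m hrows hcols).2.1 c hc
      have := pvNegCount_pos m c.1 c.2 h1
      omega
    have hfl : pvFlipsB m rows cols = [] := by
      rw [List.eq_nil_iff_forall_not_mem]
      intro c hc
      have := (pvSetEq rows cols m front hrows hcols hinv c).mpr hc
      rw [hS] at this
      simp at this
    have hret : (if neg = 0 then pass else -1)
        = (if pvAllNonneg m rows cols then pass else -1) := by
      by_cases h0 : pvWNeg m rows cols = 0
      · rw [if_pos (by omega : neg = 0), if_pos ((pvWNeg_eq_zero_iff m rows cols).mp h0)]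
      · rw [if_neg (by omega : ¬neg = 0)]
        rw [if_neg (by
          intro hall
          exact h0 ((pvWNeg_eq_zero_iff m rows cols).mpr hall))]
    rw [loopB_succ_nil b rows cols m pass hfl]
    by_cases hfe : front = []
    · rw [loopA_succ_nil a m front pass neg hfe, hret]
    · rw [loopA_succ_stop a m front pass neg hfe hS, hret]
  | succ n ih =>
    intro rows cols fA fB m front pass neg hn hfA hfB hrows hcols hinv hneg
    obtain ⟨a, rfl⟩ : ∃ a, fA = a + 1 := ⟨fA - 1, by omega⟩
    obtain ⟨b, rfl⟩ : ∃ b, fB = b + 1 := ⟨fB - 1, by omega⟩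
    have hret : (if neg = 0 then pass else -1)
        = (if pvAllNonneg m rows cols then pass else -1) := by
      by_cases h0 : pvWNeg m rows cols = 0
      · rw [if_pos (by omega : neg = 0), if_pos ((pvWNeg_eq_zero_iff m rows cols).mp h0)]
      · rw [if_neg (by omega : ¬neg = 0)]
        rw [if_neg (by
          intro hall
          exact h0 ((pvWNeg_eq_zero_iff m rows cols).mpr hall))]
    have hseteq := pvSetEq rows cols m front hrows hcols hinv
    by_cases hS : (passConvert m front).1 = []
    · have hfl : pvFlipsB m rows cols = [] := by
        rw [List.eq_nil_iff_forall_not_mem]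
        intro c hc
        have := (hseteq c).mpr hc
        rw [hS] at this
        simp at this
      rw [loopB_succ_nil b rows cols m pass hfl]
      by_cases hfe : front = []
      · rw [loopA_succ_nil a m front pass neg hfe, hret]
      · rw [loopA_succ_stop a m front pass neg hfe hS, hret]
    · have hfe : front ≠ [] := by
        intro h
        apply hS
        rw [h]
        simp [passConvert]
      obtain ⟨hN, hnegS, -⟩ := pvPC_char rows cols front m hrows hcols
      have hsub : ∀ c ∈ (passConvert m front).1, c ∈ pvGridB rows cols := by
        intro c hc
        exact (List.mem_filter.mp ((hseteq c).mp hc)).1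
      have hflN : (pvFlipsB m rows cols).Nodup := (pvNodup_gridB rows cols).filter _
      have hperm : (pvFlipsB m rows cols).Perm (passConvert m front).1 :=
        (List.perm_ext_iff_of_nodup hflN hN).mpr (fun c => (hseteq c).symm)
      have hfl_ne : pvFlipsB m rows cols ≠ [] := by
        obtain ⟨c, hc⟩ := List.exists_mem_of_ne_nil _ hS
        exact List.ne_nil_of_mem ((hseteq c).mp hc)
      have hfoldeq : (pvFlipsB m rows cols).foldl (fun mm c => pvFlipCell mm c.1 c.2) m
          = (passConvert m front).2 := by
        rw [pvPC_matrix front m]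
        exact hperm.foldl_eq' (fun x _ y _ z => pvFlipCell_comm z x y) m
      rw [loopA_succ_go a m front pass neg hfe hS,
          loopB_succ_go b rows cols m pass hfl_ne, hfoldeq]
      have hd := pvPassConvert_dims front m
      have hlen : 1 ≤ (passConvert m front).1.length := by
        cases hhh : (passConvert m front).1 with
        | nil => exact absurd hhh hS
        | cons x l => simp
      have hcnt := pvPassConvert_negCount m front
      have hw := pvWNeg_step m rows cols (passConvert m front).1 hN hsub hnegS
      rw [← pvPC_matrix front m] at hw
      have hinv' := pvInv_step rows cols m front hrows hcols hinv
      rw [← pvPC_matrix front m] at hinv'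
      exact ih rows cols a b (passConvert m front).2 (passConvert m front).1 (pass + 1)
        (neg - ((passConvert m front).1.length : Int))
        (by omega) (by omega) (by omega)
        (by rw [hrows, hd.1]) (by rw [hcols, hd.2])
        hinv'
        (by omega)

theorem minimumPassesOfMatrix_equiv (matrix : List (List Int)) :
    minimumPassesOfMatrix matrix = minimumPassesOfMatrix_alt matrix := by
  unfold minimumPassesOfMatrix minimumPassesOfMatrix_alt
  have hcols : (if matrix.length ≠ 0 then ((matrix.getD 0 []).length : Int) else 0)
      = ((matrix.getD 0 []).length : Int) := by
    cases matrix <;> simp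
  dsimp only
  rw [hcols, pvScanA_char]
  exact pvMain (pvNegCount matrix) (matrix.length : Int) ((matrix.getD 0 []).length : Int)
    (pvNegCount matrix + 1) (pvNegCount matrix + 1) matrix _ 0 _
    (le_refl _) (by omega) (by omega) rfl rfl
    (pvInv_init matrix _ _) rfl

-- ===== VERDICT (by name: the statement is the Claim_ definition above) =====
theorem minimumPassesOfMatrix_spec : Claim_equal_minimumPassesOfMatrix := by
  intro matrix _ _
  unfold Spec_minimumPassesOfMatrix
  exact minimumPassesOfMatrix_equiv matrix
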